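-- pv_equiv track=rewrite | github.com/William-f-12/python_final_project | Little_Game.py | Geo
-- ===== SOURCE A (Python) =====
-- def Geo(position: int):
--     """position: need to be an integer greater than 0, return first # numbers of the series"""
--
--     if type(position) != int or position < 1:
--         raise ValueError("position need to be an integer greater than 0")
--
--     g = [1]
--     if position > 1:
--         while len(g) < position:
--             new = g[-1] * 3 - 1
--             g.append(new)
--
--     return g[:position]
-- ===== SOURCE B (Python) =====
-- def Geo(position: int):
--     """position: need to be an integer greater than 0, return first # numbers of the series"""
--
--     if type(position) != int or position < 1:
--         raise ValueError("position need to be an integer greater than 0")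
--
--     return [(3 ** i + 1) // 2 for i in range(position)]
-- ===== Notes on version B (the rewrite author's own statement) =====
-- stated objective: idiomatic
-- what changed: Replaces the while-loop recurrence g[i]=3*g[i-1]-1 (with append and final slice) by a direct comprehension using the closed form g[i]=(3**i+1)//2, each term computed from its index.
import Mathlib
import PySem

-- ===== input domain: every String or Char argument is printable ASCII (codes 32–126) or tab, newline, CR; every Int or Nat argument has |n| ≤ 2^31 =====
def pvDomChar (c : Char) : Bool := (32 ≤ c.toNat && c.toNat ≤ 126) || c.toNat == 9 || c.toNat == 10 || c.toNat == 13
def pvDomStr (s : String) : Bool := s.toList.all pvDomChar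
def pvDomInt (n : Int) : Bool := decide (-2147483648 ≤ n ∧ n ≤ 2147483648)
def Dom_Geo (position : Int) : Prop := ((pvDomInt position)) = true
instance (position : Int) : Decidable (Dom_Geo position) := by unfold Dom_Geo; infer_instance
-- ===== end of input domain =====

-- B replaces A's while-loop recurrence by the closed form (3**i+1)//2 per index (idiomatic comprehension).

-- ===== PORT A =====
-- the while-loop: runs while len(g) < position, appending g[-1]*3 - 1; fuel = number of iterations
def GeoLoop : Nat → List Int → List Int
  | 0, g => g
  | Nat.succ n, g => GeoLoop n (g ++ [PySem.List.pyGetD g (-1) 0 * 3 - 1])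

def Geo (position : Int) : List Int :=
  let g : List Int := [1]
  let g := if position > 1 then GeoLoop (position.toNat - 1) g else g
  PySem.List.slice g none (some position)

-- ===== PORT B =====
def Geo_alt (position : Int) : List Int :=
  (PySem.List.pyRange 0 position 1).map (fun i => PySem.Int.floordiv (3 ^ i.toNat + 1) 2)

-- ===== PRECONDITION & SPEC =====
-- Pre_: A raises ValueError on position < 1
def Pre_Geo (position : Int) : Prop := 1 ≤ position
instance (position : Int) : Decidable (Pre_Geo position) := by unfold Pre_Geo; infer_instance
def pvWitness_Geo : Int := 3

def Spec_Geo (position : Int) (out : List Int) : Prop := out = Geo_alt position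
instance (position : Int) (out : List Int) : Decidable (Spec_Geo position out) := by unfold Spec_Geo; infer_instance

-- ===== CLAIM (what is proved, stated in full; the proofs are below) =====
def Claim_equal_Geo : Prop := ∀ (position : Int), Dom_Geo position → Pre_Geo position → Spec_Geo position (Geo position)

-- ===== LEMMAS AND PROOFS =====

-- the closed-form term
def geoTerm (k : Nat) : Int := PySem.Int.floordiv (3 ^ k + 1) 2

theorem geoTerm_step (k : Nat) : geoTerm k * 3 - 1 = geoTerm (k + 1) := by
  have h2 : (2 : Int) ∣ 3 ^ k + 1 := by
    have : Odd ((3:Int) ^ k) := Odd.pow ⟨1, by ring⟩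
    obtain ⟨m, hm⟩ := this
    exact ⟨m + 1, by omega⟩
  have hp : (3 : Int) ^ (k + 1) = 3 * 3 ^ k := by ring
  simp only [geoTerm, PySem.Int.floordiv_eq_ediv_of_pos (by omega : (0:Int) < 2)]
  omega

theorem geoLoop_inv (n k : Nat) :
    GeoLoop n ((List.range (k + 1)).map geoTerm) = (List.range (k + 1 + n)).map geoTerm := by
  induction n generalizing k with
  | zero => rfl
  | succ m ih =>
    have hlast : PySem.List.pyGetD ((List.range (k + 1)).map geoTerm) (-1) 0 = geoTerm k := by
      rw [List.range_succ, List.map_append]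
      exact PySem.List.pyGetD_neg_one_append_singleton _ _ _
    show GeoLoop m (((List.range (k + 1)).map geoTerm) ++ [_]) = _
    have happ : (List.range (k + 1 + 1)).map geoTerm
        = ((List.range (k + 1)).map geoTerm) ++ [geoTerm (k + 1)] := by
      rw [List.range_succ, List.map_append]; rfl
    rw [hlast, geoTerm_step, ← happ, ih (k + 1)]
    have hk : k + 1 + 1 + m = k + 1 + (m + 1) := by omega
    rw [hk]

-- ===== VERDICT (by name: the statement is the Claim_ definition above) =====
theorem Geo_spec : Claim_equal_Geo := by
  intro position _ hpre
  unfold Spec_Geo Geo Geo_alt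
  have hpos : (0:Int) < position := hpre
  obtain ⟨n, hn, hn1⟩ : ∃ n : Nat, position = (n : Int) ∧ 1 ≤ n :=
    ⟨position.toNat, by omega, by omega⟩
  subst hn
  rw [PySem.List.pyRange_zero_natCast]
  have hmap : ((List.range n).map (fun k : Nat => (k : Int))).map
      (fun i => PySem.Int.floordiv (3 ^ i.toNat + 1) 2) = (List.range n).map geoTerm := by
    rw [List.map_map]
    exact List.map_congr_left (fun k _ => by simp [geoTerm])
  rw [hmap]
  by_cases h1 : (n : Int) > 1
  · simp only [if_pos h1]
    have : Int.toNat n - 1 = n - 1 := by omega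
    rw [this]
    have hbase : ([1] : List Int) = (List.range 1).map geoTerm := by decide
    rw [hbase]
    have := geoLoop_inv (n - 1) 0
    rw [this]
    have hlen : 0 + 1 + (n - 1) = n := by omega
    rw [hlen]
    have hfull : (((List.range n).map geoTerm).length : Int) ≤ (n : Int) := by simp
    rw [PySem.List.slice_to_natCast]
    simp
  · have hn1' : n = 1 := by omega
    subst hn1'
    simp only [if_neg h1]
    decide
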